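-- pv_equiv track=rewrite | github.com/helenelsn/adventOfCode22 | day_6/day6part2.py | analyse_str
-- ===== SOURCE A (Python) =====
-- def analyse_str(str) :
--     count = 1
--     for i in range(13) :
--         if str[i] not in str[i+1:] :
--             count += 1
--             if count == 14 :
--                 return 1
--     return 0
-- ===== SOURCE B (Python) =====
-- def analyse_str(str):
--     # One pass builds a frequency table of the whole string; the answer is 1
--     # iff each of the first 13 characters occurs exactly once in the string.
--     counts = {}
--     for ch in str:
--         counts[ch] = counts.get(ch, 0) + 1
--     ok = 1
--     for i in range(13):
--         if counts[str[i]] != 1: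
--             ok = 0
--     return ok
-- ===== Notes on version B (the rewrite author's own statement) =====
-- stated objective: alternative
-- what changed: A scans, for each of the first 13 positions, whether the character reappears in the rest of the string (13 suffix substring searches with early return); B makes one pass building a character-frequency dictionary over the whole string and then checks that each of the first 13 characters has count exactly 1.
import Mathlib
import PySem

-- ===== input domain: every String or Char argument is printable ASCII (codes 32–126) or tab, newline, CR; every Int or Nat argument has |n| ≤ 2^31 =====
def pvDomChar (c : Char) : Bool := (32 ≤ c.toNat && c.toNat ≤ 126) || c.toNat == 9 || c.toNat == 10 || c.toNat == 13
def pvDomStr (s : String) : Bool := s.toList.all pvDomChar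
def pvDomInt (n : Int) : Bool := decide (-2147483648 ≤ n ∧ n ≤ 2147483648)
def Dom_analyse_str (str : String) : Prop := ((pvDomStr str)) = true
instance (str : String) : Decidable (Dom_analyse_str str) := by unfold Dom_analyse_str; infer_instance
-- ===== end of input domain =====

-- B replaces A's 13 per-position suffix searches by one frequency-counting pass over the
-- whole string followed by 13 dictionary lookups (alternative algorithm, same result).


-- ===== PORT A =====
-- the for-loop of A, carrying the loop index i and the running count (early return 1 at count == 14)
def analyseGo (s : List Char) (i : Nat) (count : Int) : Int :=
  if i < 13 then
    match PySem.List.pyGet? s (i : Int) with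
    | none => 0      -- Python raises IndexError here; excluded by Pre_analyse_str
    | some c =>
      if PySem.Chars.isIn [c] (PySem.List.slice s (some ((i : Int) + 1)) none) then
        analyseGo s (i + 1) count
      else
        if count + 1 = 14 then 1 else analyseGo s (i + 1) (count + 1)
  else 0
termination_by 13 - i

def analyse_str (str : String) : Int := analyseGo str.toList 0 1

-- ===== PORT B =====
def analyse_str_alt (str : String) : Int :=
  let s := str.toList
  let counts : PySem.Dict Char Int :=
    s.foldl (fun d ch => d.insert ch (d.getD ch 0 + 1)) PySem.Dict.empty
  (PySem.List.pyRange 0 13 1).foldl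
    (fun ok i =>
      match PySem.List.pyGet? s i with
      | none => ok       -- Python raises IndexError here; excluded by Pre_analyse_str
      | some c =>
        match counts.get? c with
        | none => ok     -- KeyError; unreachable since c is a character of s
        | some n => if n ≠ 1 then 0 else ok) 1

-- ===== PRECONDITION & SPEC =====
-- Pre_ excludes exactly the strings shorter than 13 characters, on which both A and B raise IndexError.
def Pre_analyse_str (str : String) : Prop := 13 ≤ str.toList.length
instance (str : String) : Decidable (Pre_analyse_str str) := by unfold Pre_analyse_str; infer_instance
def pvWitness_analyse_str : String := "abcdefghijklm"

def Spec_analyse_str (str : String) (out : Int) : Prop := out = analyse_str_alt str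
instance (str : String) (out : Int) : Decidable (Spec_analyse_str str out) := by unfold Spec_analyse_str; infer_instance

-- ===== CLAIM (what is proved, stated in full; the proofs are below) =====
def Claim_equal_analyse_str : Prop := ∀ (str : String), Dom_analyse_str str → Pre_analyse_str str → Spec_analyse_str str (analyse_str str)

-- ===== LEMMAS AND PROOFS =====

-- the per-position condition A tests: the character at j does not reappear later in s
def condA (s : List Char) (j : Nat) : Prop := s.getD j ' ' ∉ s.drop (j + 1)

-- A's loop only returns 0 or 1
lemma analyseGo_zero_or_one (s : List Char) :
    ∀ k i c, 13 - i ≤ k → analyseGo s i c = 0 ∨ analyseGo s i c = 1 := by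
  intro k
  induction k with
  | zero =>
    intro i c hk
    rw [analyseGo]
    have : ¬ i < 13 := by omega
    simp [this]
  | succ k ih =>
    intro i c hk
    rw [analyseGo]
    by_cases hi : i < 13
    · simp only [hi, if_true]
      cases PySem.List.pyGet? s (i : Int) with
      | none => simp
      | some ch =>
        simp only
        split_ifs with h1 h2
        · exact ih (i + 1) c (by omega)
        · simp
        · exact ih (i + 1) (c + 1) (by omega)
    · simp [hi]

-- if the count can no longer reach 14, the loop returns 0
lemma analyseGo_fail (s : List Char) :
    ∀ (k i : Nat) (c : Int), i + k = 13 → c + (k : Int) < 14 → analyseGo s i c = 0 := by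
  intro k
  induction k with
  | zero =>
    intro i c hk _
    rw [analyseGo]
    have : ¬ i < 13 := by omega
    simp [this]
  | succ k ih =>
    intro i c hk hc
    rw [analyseGo]
    have hi : i < 13 := by omega
    simp only [hi, if_true]
    cases PySem.List.pyGet? s (i : Int) with
    | none => simp
    | some ch =>
      simp only
      split_ifs with h1 h2
      · exact ih (i + 1) c (by omega) (by push_cast at hc; omega)
      · exfalso; push_cast at hc; omega
      · exact ih (i + 1) (c + 1) (by omega) (by push_cast at hc; omega)

-- the character membership test of A, rewritten to list membership in the suffix
lemma isIn_slice_iff (s : List Char) (i : Nat) :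
    PySem.Chars.isIn [s.getD i ' '] (PySem.List.slice s (some ((i : Int) + 1)) none) = true
      ↔ s.getD i ' ' ∈ s.drop (i + 1) := by
  have h1 : ((i : Int) + 1) = ((i + 1 : Nat) : Int) := by push_cast; ring
  rw [h1, PySem.List.slice_from_natCast, PySem.Chars.isIn_iff_infix, List.singleton_infix_iff]

-- on the success path (count = i + 1), the loop returns 1 iff condA holds from i on
lemma analyseGo_succ (s : List Char) (hlen : 13 ≤ s.length) :
    ∀ k i, i + k = 13 → 1 ≤ k →
      (analyseGo s i ((i : Int) + 1) = 1 ↔ ∀ j, i ≤ j → j < 13 → condA s j) := by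
  intro k
  induction k with
  | zero => intro i _ h1; omega
  | succ k ih =>
    intro i hk _
    have hi : i < 13 := by omega
    have hil : i < s.length := by omega
    rw [analyseGo]
    simp only [hi, if_true]
    have hget : PySem.List.pyGet? s (i : Int) = some s[i] := by
      rw [PySem.List.pyGet?_natCast]
      exact List.getElem?_eq_getElem hil
    rw [hget]
    have hgd : s.getD i ' ' = s[i] := List.getD_eq_getElem s ' ' hil
    simp only
    by_cases hmem : s[i] ∈ s.drop (i + 1)
    · -- condA fails at i: the loop continues with an unreachable count, result 0
      have hin : PySem.Chars.isIn [s[i]] (PySem.List.slice s (some ((i : Int) + 1)) none) = true := by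
        rw [← hgd] at hmem ⊢; exact (isIn_slice_iff s i).mpr hmem
      rw [if_pos hin]
      have h0 : analyseGo s (i + 1) ((i : Int) + 1) = 0 :=
        analyseGo_fail s k (i + 1) ((i : Int) + 1) (by omega) (by omega)
      rw [h0]
      constructor
      · intro h; exact absurd h (by norm_num)
      · intro h
        exact absurd hmem (by rw [← hgd]; exact h i le_rfl hi)
    · -- condA holds at i
      have hin : ¬ PySem.Chars.isIn [s[i]] (PySem.List.slice s (some ((i : Int) + 1)) none) = true := by
        rw [← hgd] at hmem ⊢
        intro h; exact hmem ((isIn_slice_iff s i).mp h)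
      rw [if_neg hin]
      have hcondi : condA s i := by unfold condA; rw [hgd]; exact hmem
      by_cases hk0 : k = 0
      · -- last iteration i = 12: count reaches 14, return 1
        subst hk0
        have hi12 : i = 12 := by omega
        have h14 : (i : Int) + 1 + 1 = 14 := by rw [hi12]; norm_num
        rw [if_pos h14]
        constructor
        · intro _ j hij hj13
          have : j = i := by omega
          rwa [this]
        · intro _; rfl
      · -- middle iteration: count goes to (i+1)+1, recurse
        have h14 : ¬ (i : Int) + 1 + 1 = 14 := by
          intro h
          have : i = 12 := by omega
          omega
        rw [if_neg h14]
        have harg : (i : Int) + 1 + 1 = ((i + 1 : Nat) : Int) + 1 := by push_cast; ring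
        rw [harg]
        rw [ih (i + 1) (by omega) (by omega)]
        constructor
        · intro h j hij hj13
          rcases Nat.eq_or_lt_of_le hij with h' | h'
          · rwa [← h']
          · exact h j (by omega) hj13
        · intro h j hij hj13
          exact h j (by omega) hj13

-- characterisation of port A
lemma analyse_str_eq_one_iff (str : String) (hlen : 13 ≤ str.toList.length) :
    analyse_str str = 1 ↔ ∀ j, j < 13 → condA str.toList j := by
  unfold analyse_str
  have h := analyseGo_succ str.toList hlen 13 0 (by omega) (by omega)
  simp only [Nat.cast_zero, zero_add] at h
  rw [h]
  constructor
  · intro h j hj; exact h j (Nat.zero_le j) hj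
  · intro h j _ hj; exact h j hj

-- the B-side flag fold: result is the accumulator if every element passes, else 0
lemma flag_fold (p : Int → Bool) :
    ∀ (l : List Int) (acc : Int),
      l.foldl (fun ok i => if p i then ok else 0) acc = if l.all p then acc else 0 := by
  intro l
  induction l with
  | nil => intro acc; simp
  | cons a l ih =>
    intro acc
    simp only [List.foldl_cons, List.all_cons]
    by_cases hp : p a
    · simp [hp, ih]
    · simp [hp, ih]

-- the counter built by B's first loop, looked up at a character of s
lemma counts_get? (s : List Char) (c : Char) (hc : c ∈ s) :
    ((s.foldl (fun d ch => d.insert ch (d.getD ch 0 + 1)) PySem.Dict.empty : PySem.Dict Char Int)).get? c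
      = some ((s.count c : Int)) := by
  rw [PySem.Dict.foldl_insert_getD_add_one_eq_counter]
  have hco : (PySem.Dict.counter s).contains c = true := by
    rw [PySem.Dict.contains_counter]
    simpa using hc
  have hgd : (PySem.Dict.counter s).getD c 0 = (s.count c : Int) := PySem.Dict.getD_counter s c
  rcases h : (PySem.Dict.counter s).get? c with _ | v
  · rw [PySem.Dict.contains_eq_isSome_get?, h] at hco; simp at hco
  · rw [PySem.Dict.getD_eq_get?_getD, h] at hgd
    simp at hgd
    rw [hgd]

-- characterisation of port B as a single boolean test over range(13)
def condB (s : List Char) : Int → Bool := fun i => decide (s.count (s.getD i.toNat ' ') = 1)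

lemma analyse_str_alt_eq_if (str : String) (hlen : 13 ≤ str.toList.length) :
    analyse_str_alt str
      = if (PySem.List.pyRange 0 13 1).all (condB str.toList) then 1 else 0 := by
  unfold analyse_str_alt
  simp only
  set s := str.toList with hs
  have hbody : ∀ (ok i : Int), i ∈ PySem.List.pyRange 0 13 1 →
      (match PySem.List.pyGet? s i with
       | none => ok
       | some c =>
         match ((s.foldl (fun d ch => d.insert ch (d.getD ch 0 + 1)) PySem.Dict.empty : PySem.Dict Char Int)).get? c with
         | none => ok
         | some n => if n ≠ 1 then 0 else ok)
      = if condB s i then ok else 0 := by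
    intro ok i hi
    rw [PySem.List.mem_pyRange_one] at hi
    obtain ⟨j, rfl⟩ : ∃ j : Nat, i = (j : Int) := ⟨i.toNat, by omega⟩
    have hj : j < s.length := by omega
    have hget : PySem.List.pyGet? s (j : Int) = some s[j] := by
      rw [PySem.List.pyGet?_natCast]
      exact List.getElem?_eq_getElem hj
    rw [hget]
    dsimp only
    have hmem : s[j] ∈ s := List.getElem_mem hj
    rw [counts_get? s _ hmem]
    dsimp only
    have hgd : s.getD j ' ' = s[j] := List.getD_eq_getElem s ' ' hj
    unfold condB
    simp only [Int.toNat_natCast, hgd]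
    by_cases hcount : s.count s[j] = 1
    · simp [hcount]
    · have : (s.count s[j] : Int) ≠ 1 := by exact_mod_cast hcount
      simp [hcount, this]
  rw [PySem.List.foldl_congr_mem _ _ _ _ hbody, flag_fold]

lemma analyse_str_alt_zero_or_one (str : String) (hlen : 13 ≤ str.toList.length) :
    analyse_str_alt str = 0 ∨ analyse_str_alt str = 1 := by
  rw [analyse_str_alt_eq_if str hlen]
  split_ifs <;> simp

lemma analyse_str_alt_eq_one_iff (str : String) (hlen : 13 ≤ str.toList.length) :
    analyse_str_alt str = 1
      ↔ ∀ j, j < 13 → str.toList.count (str.toList.getD j ' ') = 1 := by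
  rw [analyse_str_alt_eq_if str hlen]
  have hall : (PySem.List.pyRange 0 13 1).all (condB str.toList) = true
      ↔ ∀ j, j < 13 → str.toList.count (str.toList.getD j ' ') = 1 := by
    rw [List.all_eq_true]
    constructor
    · intro h j hj
      have := h ((j : Int)) (by rw [PySem.List.mem_pyRange_one]; omega)
      unfold condB at this
      simpa using this
    · intro h i hi
      rw [PySem.List.mem_pyRange_one] at hi
      unfold condB
      have := h i.toNat (by omega)
      simpa using this
  constructor
  · intro h
    apply hall.mp
    by_contra hb
    rw [if_neg hb] at h
    norm_num at h
  · intro h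
    rw [if_pos (hall.mpr h)]

-- the heart of the equivalence: "no first-13 character reappears later" is
-- "each first-13 character occurs exactly once in the whole string"
lemma cond_equiv (s : List Char) (hlen : 13 ≤ s.length) :
    (∀ j, j < 13 → condA s j) ↔ (∀ j, j < 13 → s.count (s.getD j ' ') = 1) := by
  constructor
  · intro h j hj
    have hjl : j < s.length := by omega
    have hgd : s.getD j ' ' = s[j] := List.getD_eq_getElem s ' ' hjl
    rw [hgd]
    have hsplit : s = s.take (j + 1) ++ s.drop (j + 1) := (List.take_append_drop (j + 1) s).symm
    have hdrop : (s.drop (j + 1)).count s[j] = 0 := by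
      rw [List.count_eq_zero]
      have := h j hj
      unfold condA at this
      rwa [hgd] at this
    have htake1 : s.take (j + 1) = s.take j ++ [s[j]] := List.take_succ_eq_append_getElem hjl
    have htakej : (s.take j).count s[j] = 0 := by
      rw [List.count_eq_zero]
      intro hmem
      obtain ⟨p, hp, hpe⟩ := List.getElem_of_mem hmem
      have hpj : p < j := by
        have := List.length_take_le j s
        omega
      have hpl : p < s.length := by omega
      rw [List.getElem_take] at hpe
      -- s[p] = s[j] with p < j < 13 contradicts condA at p
      have hcp := h p (by omega)
      unfold condA at hcp
      rw [List.getD_eq_getElem s ' ' hpl] at hcp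
      apply hcp
      have hjd : s[j] = (s.drop (p + 1))[j - (p + 1)]'(by simp [List.length_drop]; omega) := by
        rw [List.getElem_drop]
        congr 1
        omega
      rw [hpe, hjd]
      exact List.getElem_mem _
    have heq : s.count s[j] = (s.take (j + 1)).count s[j] + (s.drop (j + 1)).count s[j] := by
      have h' : ((s.take (j + 1)) ++ (s.drop (j + 1))).count s[j]
          = (s.take (j + 1)).count s[j] + (s.drop (j + 1)).count s[j] := List.count_append ..
      rwa [List.take_append_drop] at h'
    rw [heq, hdrop, htake1, List.count_append, htakej]
    simp
  · intro h j hj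
    have hjl : j < s.length := by omega
    have hgd : s.getD j ' ' = s[j] := List.getD_eq_getElem s ' ' hjl
    unfold condA
    rw [hgd]
    intro hmem
    have hcount := h j hj
    rw [hgd] at hcount
    have hsplit : s = s.take (j + 1) ++ s.drop (j + 1) := (List.take_append_drop (j + 1) s).symm
    have h1 : 0 < (s.take (j + 1)).count s[j] := by
      rw [List.count_pos_iff]
      have : (s.take (j + 1))[j]'(by simp; omega) = s[j] := List.getElem_take ..
      rw [← this]
      exact List.getElem_mem _
    have h2 : 0 < (s.drop (j + 1)).count s[j] := List.count_pos_iff.mpr hmem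
    have : s.count s[j] = (s.take (j + 1)).count s[j] + (s.drop (j + 1)).count s[j] := by
      have h' : ((s.take (j + 1)) ++ (s.drop (j + 1))).count s[j]
          = (s.take (j + 1)).count s[j] + (s.drop (j + 1)).count s[j] := List.count_append ..
      rwa [List.take_append_drop] at h'
    omega

-- ===== VERDICT (by name: the statement is the Claim_ definition above) =====
theorem analyse_str_spec : Claim_equal_analyse_str := by
  intro str _ hpre
  unfold Spec_analyse_str
  unfold Pre_analyse_str at hpre
  by_cases hc : ∀ j, j < 13 → str.toList.count (str.toList.getD j ' ') = 1
  · rw [(analyse_str_alt_eq_one_iff str hpre).mpr hc]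
    exact (analyse_str_eq_one_iff str hpre).mpr ((cond_equiv str.toList hpre).mpr hc)
  · have hA : analyse_str str = 0 := by
      rcases analyseGo_zero_or_one str.toList 13 0 1 (by omega) with h | h
      · exact h
      · exact absurd (hc ((cond_equiv str.toList hpre).mp ((analyse_str_eq_one_iff str hpre).mp h))) (fun f => f)
    have hB : analyse_str_alt str = 0 := by
      rcases analyse_str_alt_zero_or_one str hpre with h | h
      · exact h
      · exact absurd ((analyse_str_alt_eq_one_iff str hpre).mp h) hc
    rw [hA, hB]
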